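-- pv_equiv track=rewrite | github.com/zse04152005-del/vision-scope-fire-guard | ui_components.py | compute_grid_cols
-- ===== SOURCE A (Python) =====
-- def compute_grid_cols(available_width: int, tile_w: int, spacing: int, max_cols: int) -> int:
--     if max_cols <= 1:
--         return 1
--     for cols in range(max_cols, 0, -1):
--         width = cols * tile_w + spacing * (cols - 1)
--         if width <= available_width:
--             return cols
--     return 1
-- ===== SOURCE B (Python) =====
-- def compute_grid_cols(available_width: int, tile_w: int, spacing: int, max_cols: int) -> int:
--     if max_cols <= 1:
--         return 1
--     # width(cols) = cols*(tile_w+spacing) - spacing, so the fit test is cols*pitch <= budget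
--     pitch = tile_w + spacing
--     budget = available_width + spacing
--     if pitch <= 0:
--         # width is non-increasing in cols: either max_cols fits or nothing does
--         return max_cols if max_cols * pitch <= budget else 1
--     return max(1, min(max_cols, budget // pitch))
-- ===== Notes on version B (the rewrite author's own statement) =====
-- stated objective: faster
-- what changed: Replaces the descending linear scan over candidate column counts with a closed-form floor division (with a separate constant-time case for non-positive tile pitch).
import Mathlib
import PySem

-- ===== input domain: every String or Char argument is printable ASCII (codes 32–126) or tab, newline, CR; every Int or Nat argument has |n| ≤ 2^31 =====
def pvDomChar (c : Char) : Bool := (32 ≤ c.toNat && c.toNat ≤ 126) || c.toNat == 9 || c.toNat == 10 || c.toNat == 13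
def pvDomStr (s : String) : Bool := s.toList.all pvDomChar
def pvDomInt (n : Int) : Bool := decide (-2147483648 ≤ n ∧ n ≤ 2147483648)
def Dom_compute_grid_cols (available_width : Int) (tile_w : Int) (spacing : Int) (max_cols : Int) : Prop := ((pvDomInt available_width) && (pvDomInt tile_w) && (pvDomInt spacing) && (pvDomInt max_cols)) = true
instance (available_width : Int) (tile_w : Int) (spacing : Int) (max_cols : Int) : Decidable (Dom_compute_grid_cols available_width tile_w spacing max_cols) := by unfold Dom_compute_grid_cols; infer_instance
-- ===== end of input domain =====

-- ===== PORT A =====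
-- B replaces A's descending linear scan with a closed-form floor division (O(1) vs O(max_cols)); measured faster.

-- the 'for cols in range(max_cols, 0, -1)' loop with its early return; Python's range is
-- lazy, so the loop is ported as a countdown on cols (fuel = number of remaining iterations)
def pvLoopA (available_width : Int) (tile_w : Int) (spacing : Int) : Nat → Int → Int
  | 0, _ => 1
  | n + 1, cols =>
      if cols * tile_w + spacing * (cols - 1) ≤ available_width then cols
      else pvLoopA available_width tile_w spacing n (cols - 1)

def compute_grid_cols (available_width : Int) (tile_w : Int) (spacing : Int) (max_cols : Int) : Int :=
  if max_cols ≤ 1 then 1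
  else pvLoopA available_width tile_w spacing max_cols.toNat max_cols

-- ===== PORT B =====
def compute_grid_cols_alt (available_width : Int) (tile_w : Int) (spacing : Int) (max_cols : Int) : Int :=
  if max_cols ≤ 1 then 1
  else
    let pitch := tile_w + spacing
    let budget := available_width + spacing
    if pitch ≤ 0 then (if max_cols * pitch ≤ budget then max_cols else 1)
    else max 1 (min max_cols (PySem.Int.floordiv budget pitch))

-- ===== PRECONDITION & SPEC =====
def Spec_compute_grid_cols (available_width : Int) (tile_w : Int) (spacing : Int) (max_cols : Int) (out : Int) : Prop := out = compute_grid_cols_alt available_width tile_w spacing max_cols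
instance (available_width : Int) (tile_w : Int) (spacing : Int) (max_cols : Int) (out : Int) : Decidable (Spec_compute_grid_cols available_width tile_w spacing max_cols out) := by unfold Spec_compute_grid_cols; infer_instance

-- ===== CLAIM (what is proved, stated in full; the proofs are below) =====
def Claim_equal_compute_grid_cols : Prop := ∀ (available_width : Int) (tile_w : Int) (spacing : Int) (max_cols : Int), Dom_compute_grid_cols available_width tile_w spacing max_cols → Spec_compute_grid_cols available_width tile_w spacing max_cols (compute_grid_cols available_width tile_w spacing max_cols)

-- ===== LEMMAS AND PROOFS =====

-- the scan from n down to 1 computes B's closed form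
lemma pvLoopA_eq (aw tw sp : Int) (n : Nat) (h : 1 ≤ n) :
    pvLoopA aw tw sp n (n : Int) =
      (if tw + sp ≤ 0 then (if (n : Int) * (tw + sp) ≤ aw + sp then (n : Int) else 1)
       else max 1 (min (n : Int) (PySem.Int.floordiv (aw + sp) (tw + sp)))) := by
  induction n, h using Nat.le_induction with
  | base =>
      simp only [pvLoopA, Nat.cast_one]
      have hiff : (1 : Int) * tw + sp * (1 - 1) ≤ aw ↔ (1 : Int) * (tw + sp) ≤ aw + sp := by
        constructor <;> intro hh <;> nlinarith
      split_ifs with h1 h2 h3 h2 h3 <;> omega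
  | succ m hn ih =>
      have hm1 : (1:Int) ≤ (m : Int) := by exact_mod_cast hn
      rw [show ((m + 1 : Nat) : Int) = (m : Int) + 1 by push_cast; ring]
      simp only [pvLoopA, show ((m : Int) + 1 - 1) = (m : Int) by ring]
      have hiff : ((m : Int) + 1) * tw + sp * (m : Int) ≤ aw ↔
          ((m : Int) + 1) * (tw + sp) ≤ aw + sp := by
        constructor <;> intro hh <;> nlinarith
      by_cases hp : tw + sp ≤ 0
      · by_cases hc : ((m : Int) + 1) * tw + sp * (m : Int) ≤ aw
        · rw [if_pos hc, if_pos hp, if_pos (hiff.mp hc)]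
        · have h2 : ¬ ((m : Int) + 1) * (tw + sp) ≤ aw + sp := fun hh => hc (hiff.mpr hh)
          have h3 : ¬ ((m : Int)) * (tw + sp) ≤ aw + sp := by nlinarith
          rw [if_neg hc, ih]
          simp only [if_pos hp, if_neg h3, if_neg h2]
      · have hppos : 0 < tw + sp := by omega
        have hfd : PySem.Int.floordiv (aw + sp) (tw + sp) = (aw + sp) / (tw + sp) := by
          simp [PySem.Int.floordiv, Int.fdiv_eq_ediv, le_of_lt hppos]
        have hdiff : ∀ k : Int, k ≤ (aw + sp) / (tw + sp) ↔ k * (tw + sp) ≤ aw + sp :=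
          fun k => Int.le_ediv_iff_mul_le hppos
        by_cases hc : ((m : Int) + 1) * tw + sp * (m : Int) ≤ aw
        · have hd : (m : Int) + 1 ≤ (aw + sp) / (tw + sp) := (hdiff _).mpr (hiff.mp hc)
          rw [if_pos hc, if_neg hp, hfd]
          omega
        · have hd : ¬ ((m : Int) + 1 ≤ (aw + sp) / (tw + sp)) :=
            fun hh => hc (hiff.mpr ((hdiff _).mp hh))
          rw [if_neg hc, ih]
          simp only [if_neg hp, hfd]
          omega

-- ===== VERDICT (by name: the statement is the Claim_ definition above) =====
theorem compute_grid_cols_spec : Claim_equal_compute_grid_cols := by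
  intro aw tw sp mc _
  unfold Spec_compute_grid_cols compute_grid_cols compute_grid_cols_alt
  by_cases h : mc ≤ 1
  · simp [h]
  · have h2 : (1:Int) ≤ mc := by omega
    have hmc : ((mc.toNat : Int)) = mc := Int.toNat_of_nonneg (by omega)
    have hn : 1 ≤ mc.toNat := by omega
    have := pvLoopA_eq aw tw sp mc.toNat hn
    rw [hmc] at this
    simp [h, this]
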